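-- pv_equiv track=rewrite | github.com/tompko/praxis | python/divisors.py | divisors_sieve
-- ===== SOURCE A (Python) =====
-- def divisors_sieve(limit):
--     divisors = [[1] for i in range(limit)]
--
--     for i in range(2, limit):
--         m = i
--         while m < limit:
--             divisors[m].append(i)
--             m += i
--
--     return divisors
-- ===== SOURCE B (Python) =====
-- def divisors_sieve(limit):
--     result = []
--     for m in range(limit):
--         small, large = [1], []
--         d = 2
--         while d * d <= m:
--             if m % d == 0:
--                 small.append(d)
--                 q = m // d
--                 if q != d:
--                     large.append(q)
--             d += 1
--         if m > 1:
--             small_done = small + large[::-1]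
--             small_done.append(m)
--             result.append(small_done)
--         else:
--             result.append(small)
--     return result
-- ===== Notes on version B (the rewrite author's own statement) =====
-- stated objective: alternative
-- what changed: B computes each row independently by trial division up to sqrt(m), collecting each small divisor d and its cofactor m//d and stitching the row together, instead of A's sieve that stamps each i into all its multiples' rows.
import Mathlib
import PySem

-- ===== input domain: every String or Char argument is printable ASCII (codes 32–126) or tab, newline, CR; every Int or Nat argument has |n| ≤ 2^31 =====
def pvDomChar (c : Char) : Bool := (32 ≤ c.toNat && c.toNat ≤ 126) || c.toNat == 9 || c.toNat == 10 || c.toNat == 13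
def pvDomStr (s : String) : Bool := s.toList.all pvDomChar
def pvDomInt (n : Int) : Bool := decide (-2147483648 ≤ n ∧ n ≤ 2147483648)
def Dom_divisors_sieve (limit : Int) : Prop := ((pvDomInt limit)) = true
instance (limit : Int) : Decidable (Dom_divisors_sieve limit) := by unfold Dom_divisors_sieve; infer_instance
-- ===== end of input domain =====

-- B computes each row independently by trial division up to sqrt(m), pairing each small
-- divisor d with its cofactor m // d, instead of A's sieve stamping each i into its
-- multiples' rows; objective: alternative. A mutates only its local table.

-- ===== PORT A =====
-- inner 'while m < limit' loop of A; fuel only makes the recursion structural: it is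
-- (limit - m).toNat, an upper bound on the iteration count since m strictly increases by i ≥ 2.
def pvStamp (i limit : Int) (divs : List (List Int)) (m : Int) : Nat → List (List Int)
  | 0 => divs
  | fuel + 1 =>
    if m < limit then
      pvStamp i limit (divs.modify m.toNat (fun l => l ++ [i])) (m + i) fuel
    else divs

def divisors_sieve (limit : Int) : List (List Int) :=
  let divisors := (PySem.List.pyRange 0 limit 1).map (fun _ => ([1] : List Int))
  (PySem.List.pyRange 2 limit 1).foldl
    (fun divs i => pvStamp i limit divs i (limit - i).toNat) divisors

-- ===== PORT B =====
-- inner 'while d * d <= m' loop of B; fuel makes the recursion structural: m.toNat + 1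
-- bounds the iteration count since d starts at 2 and increases by 1 while d * d ≤ m.
def pvTrial (m : Int) (small large : List Int) (d : Int) : Nat → List Int × List Int
  | 0 => (small, large)
  | fuel + 1 =>
    if d * d ≤ m then
      if PySem.Int.mod m d = 0 then
        let q := PySem.Int.floordiv m d
        pvTrial m (small ++ [d]) (if q ≠ d then large ++ [q] else large) (d + 1) fuel
      else pvTrial m small large (d + 1) fuel
    else (small, large)

def divisors_sieve_alt (limit : Int) : List (List Int) :=
  (PySem.List.pyRange 0 limit 1).foldl
    (fun result m =>
      let p := pvTrial m [1] [] 2 (m.toNat + 1)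
      if m > 1 then result ++ [(p.1 ++ p.2.reverse) ++ [m]]
      else result ++ [p.1])
    []

-- ===== PRECONDITION & SPEC =====
def Spec_divisors_sieve (limit : Int) (out : List (List Int)) : Prop := out = divisors_sieve_alt limit
instance (limit : Int) (out : List (List Int)) : Decidable (Spec_divisors_sieve limit out) := by unfold Spec_divisors_sieve; infer_instance

-- ===== CLAIM =====
def Claim_equal_divisors_sieve : Prop := ∀ (limit : Int), Dom_divisors_sieve limit → Spec_divisors_sieve limit (divisors_sieve limit)

-- ===== LEMMAS AND PROOFS =====

theorem pvStamp_length (i limit : Int) (fuel : Nat) :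
    ∀ (divs : List (List Int)) (m : Int), (pvStamp i limit divs m fuel).length = divs.length := by
  induction fuel with
  | zero => intro divs m; rfl
  | succ f ih =>
    intro divs m
    simp only [pvStamp]
    split
    · rw [ih]; simp
    · rfl

theorem pvStamp_getElem (i limit : Int) (fuel : Nat) :
    ∀ (divs : List (List Int)) (m : Int), 2 ≤ i → 0 ≤ m →
    ((divs.length : Int) = limit) → (limit - m).toNat ≤ fuel →
    ∀ k : Nat, (pvStamp i limit divs m fuel)[k]? =
      if m ≤ (k : Int) ∧ i ∣ ((k : Int) - m) then (fun l => l ++ [i]) <$> divs[k]? else divs[k]? := by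
  induction fuel with
  | zero =>
    intro divs m hi hm hlen hfuel k
    simp only [pvStamp]
    split_ifs with h
    · have hk : divs.length ≤ k := by omega
      simp [List.getElem?_eq_none hk]
    · rfl
  | succ f ih =>
    intro divs m hi hm hlen hfuel k
    simp only [pvStamp]
    by_cases hml : m < limit
    · rw [if_pos hml]
      rw [ih (divs.modify m.toNat (fun l => l ++ [i])) (m + i) hi (by omega)
          (by rw [List.length_modify]; exact hlen) (by omega) k]
      rw [List.getElem?_modify]
      by_cases hk : m.toNat = k
      · have hkm : (k : Int) = m := by omega
        have h1 : ¬(m + i ≤ (k : Int) ∧ i ∣ ((k : Int) - (m + i))) := by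
          rintro ⟨h1, _⟩; omega
        have h2 : m ≤ (k : Int) ∧ i ∣ ((k : Int) - m) := ⟨by omega, by rw [hkm]; simp⟩
        rw [if_neg h1, if_pos h2, hk]
        simp
      · have hmap : (fun a => if m.toNat = k then a ++ [i] else a) <$> divs[k]? = divs[k]? := by
          simp [hk]
        rw [hmap]
        have hiff : (m + i ≤ (k : Int) ∧ i ∣ ((k : Int) - (m + i))) ↔
            (m ≤ (k : Int) ∧ i ∣ ((k : Int) - m)) := by
          constructor
          · rintro ⟨h1, h2⟩
            refine ⟨by omega, ?_⟩
            have he : (k : Int) - m = ((k : Int) - (m + i)) + i := by ring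
            rw [he]; exact dvd_add h2 dvd_rfl
          · rintro ⟨h1, h2⟩
            have hkm' : (k : Int) ≠ m := by omega
            have hpos : 0 < (k : Int) - m := by omega
            have hle : i ≤ (k : Int) - m := Int.le_of_dvd hpos h2
            refine ⟨by omega, ?_⟩
            have he : (k : Int) - (m + i) = ((k : Int) - m) - i := by ring
            rw [he]; exact dvd_sub h2 dvd_rfl
        simp only [hiff]
    · rw [if_neg hml]
      split_ifs with h
      · have hk : divs.length ≤ k := by omega
        simp [List.getElem?_eq_none hk]
      · rfl

theorem fold_length (limit : Int) (l : List Int) (init : List (List Int)) :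
    (l.foldl (fun divs i => pvStamp i limit divs i (limit - i).toNat) init).length
      = init.length := by
  induction l generalizing init with
  | nil => rfl
  | cons a l ih => simp only [List.foldl_cons]; rw [ih, pvStamp_length]

theorem init_getElem (limit : Int) (k : Nat) :
    ((PySem.List.pyRange 0 limit 1).map (fun _ => ([1] : List Int)))[k]? =
      if k < limit.toNat then some [1] else none := by
  rw [List.getElem?_map]
  by_cases hk : k < limit.toNat
  · have hlen : k < (PySem.List.pyRange 0 limit 1).length := by
      rw [PySem.List.length_pyRange_one]; omega
    rw [List.getElem?_eq_getElem hlen]; simp [hk]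
  · have hlen : (PySem.List.pyRange 0 limit 1).length ≤ k := by
      rw [PySem.List.length_pyRange_one]; omega
    rw [List.getElem?_eq_none hlen]; simp [hk]

-- invariant of A's outer fold over i ∈ range(2, j)
theorem fold_getElem (limit : Int) (hl : 0 < limit) (j : Int) (hj : j ≤ limit) (k : Nat) :
    ((PySem.List.pyRange 2 j 1).foldl
        (fun divs i => pvStamp i limit divs i (limit - i).toNat)
        ((PySem.List.pyRange 0 limit 1).map (fun _ => ([1] : List Int))))[k]? =
      if k < limit.toNat then
        some (1 :: (PySem.List.pyRange 2 j 1).filter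
          (fun i => decide (i ∣ (k : Int)) && decide (i ≤ (k : Int))))
      else none := by
  have base : ∀ j' : Int, j' ≤ 2 → ∀ k : Nat,
      ((PySem.List.pyRange 2 j' 1).foldl
          (fun divs i => pvStamp i limit divs i (limit - i).toNat)
          ((PySem.List.pyRange 0 limit 1).map (fun _ => ([1] : List Int))))[k]? =
        if k < limit.toNat then
          some (1 :: (PySem.List.pyRange 2 j' 1).filter
            (fun i => decide (i ∣ (k : Int)) && decide (i ≤ (k : Int))))
        else none := by
    intro j' hj' k
    rw [PySem.List.pyRange_one_eq_nil hj']
    simp only [List.foldl_nil, List.filter_nil]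
    exact init_getElem limit k
  rcases le_or_gt j 2 with hj2 | hj2
  · exact base j hj2 k
  · have main : ∀ j' : Int, 2 ≤ j' → j' ≤ limit → ∀ k : Nat,
        ((PySem.List.pyRange 2 j' 1).foldl
            (fun divs i => pvStamp i limit divs i (limit - i).toNat)
            ((PySem.List.pyRange 0 limit 1).map (fun _ => ([1] : List Int))))[k]? =
          if k < limit.toNat then
            some (1 :: (PySem.List.pyRange 2 j' 1).filter
              (fun i => decide (i ∣ (k : Int)) && decide (i ≤ (k : Int))))
          else none := by
      intro j' hj'
      induction j', hj' using Int.le_induction with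
      | base => intro _ k; exact base 2 le_rfl k
      | succ j' h2j ih =>
        intro hjl k
        rw [PySem.List.pyRange_one_succ_right (by omega : (2:Int) ≤ j'), List.foldl_append]
        simp only [List.foldl_cons, List.foldl_nil]
        have hlen : (((PySem.List.pyRange 2 j' 1).foldl
            (fun divs i => pvStamp i limit divs i (limit - i).toNat)
            ((PySem.List.pyRange 0 limit 1).map (fun _ => ([1] : List Int)))).length : Int)
              = limit := by
          rw [fold_length, List.length_map, PySem.List.length_pyRange_one]
          omega
        rw [pvStamp_getElem j' limit _ _ j' (by omega) (by omega) hlen (le_refl _) k]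
        have hdvd : (j' ∣ ((k : Int) - j')) ↔ (j' ∣ (k : Int)) := by
          constructor
          · intro h; have h' := dvd_add h (dvd_refl j'); simpa using h'
          · intro h; have h' := dvd_sub h (dvd_refl j'); simpa using h'
        by_cases hk : k < limit.toNat
        · rw [if_pos hk]
          by_cases hc : j' ≤ (k : Int) ∧ j' ∣ (k : Int)
          · rw [if_pos ⟨hc.1, hdvd.mpr hc.2⟩, ih (by omega) k, if_pos hk]
            simp [List.filter_append, hc.1, hc.2]
          · rw [if_neg (by rintro ⟨h1, h2⟩; exact hc ⟨h1, hdvd.mp h2⟩), ih (by omega) k,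
                if_pos hk]
            have hpred : (decide (j' ∣ (k : Int)) && decide (j' ≤ (k : Int))) = false := by
              by_cases hd : j' ∣ (k : Int)
              · have : ¬ j' ≤ (k : Int) := fun hle => hc ⟨hle, hd⟩
                simp [this]
              · simp [hd]
            simp [List.filter_append, hpred]
        · rw [if_neg hk, ih (by omega) k, if_neg hk]
          simp
    exact main j (by omega) hj k

-- integer square root used only by the proofs (B's loop never computes it)
def pvISqrt (m : Int) : Int := (Nat.sqrt m.toNat : Int)

theorem pvISqrt_spec (m e : Int) (hm : 0 ≤ m) (he : 0 ≤ e) :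
    e * e ≤ m ↔ e ≤ pvISqrt m := by
  unfold pvISqrt
  constructor
  · intro h
    have h1 : e.toNat * e.toNat ≤ m.toNat := by
      zify [Int.toNat_of_nonneg hm, Int.toNat_of_nonneg he]
      exact h
    have h2 : e.toNat ≤ Nat.sqrt m.toNat := Nat.le_sqrt.mpr h1
    omega
  · intro h
    have h2 : e.toNat ≤ Nat.sqrt m.toNat := by omega
    have h1 : e.toNat * e.toNat ≤ m.toNat := Nat.le_sqrt.mp h2
    zify [Int.toNat_of_nonneg hm, Int.toNat_of_nonneg he] at h1
    exact h1

theorem pv_mul_floordiv (k e : Int) (he : 0 < e) (h : e ∣ k) :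
    e * PySem.Int.floordiv k e = k := by
  obtain ⟨c, rfl⟩ := h
  rw [PySem.Int.floordiv_eq_ediv_of_pos he, Int.mul_ediv_cancel_left _ (by omega)]

-- what B's inner loop computes: small divisors d with d*d ≤ m, and their cofactors
theorem pvTrial_spec (m : Int) (hm : 0 ≤ m) :
    ∀ (fuel : Nat) (d : Int) (small large : List Int), 2 ≤ d →
    (∀ e : Int, d ≤ e → e * e ≤ m → e < d + fuel) →
    pvTrial m small large d fuel =
      (small ++ (PySem.List.pyRange d (pvISqrt m + 1) 1).filter (fun e => decide (e ∣ m)),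
       large ++ ((PySem.List.pyRange d (pvISqrt m + 1) 1).filter
           (fun e => decide (e ∣ m) && decide (e * e ≠ m))).map
         (fun e => PySem.Int.floordiv m e)) := by
  intro fuel
  induction fuel with
  | zero =>
    intro d small large hd hcov
    have hsd : pvISqrt m + 1 ≤ d := by
      by_contra h
      push_neg at h
      have hdd : d * d ≤ m := (pvISqrt_spec m d hm (by omega)).mpr (by omega)
      have := hcov d le_rfl hdd
      omega
    rw [PySem.List.pyRange_one_eq_nil hsd]
    simp [pvTrial]
  | succ f ih =>
    intro d small large hd hcov
    simp only [pvTrial]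
    by_cases hdm : d * d ≤ m
    · rw [if_pos hdm]
      have hds : d ≤ pvISqrt m := (pvISqrt_spec m d hm (by omega)).mp hdm
      rw [PySem.List.pyRange_one_cons (by omega : d < pvISqrt m + 1)]
      have hcov' : ∀ e : Int, d + 1 ≤ e → e * e ≤ m → e < d + 1 + f := by
        intro e he hem
        have := hcov e (by omega) hem
        omega
      by_cases hdvd : d ∣ m
      · have hmod : PySem.Int.mod m d = 0 := (PySem.Int.mod_eq_zero_iff_dvd _ _).mpr hdvd
        rw [if_pos hmod]
        have hq : d * PySem.Int.floordiv m d = m := pv_mul_floordiv m d (by omega) hdvd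
        rw [ih (d + 1) _ _ (by omega) hcov']
        by_cases hsq : d * d = m
        · have hqd : PySem.Int.floordiv m d = d := by nlinarith [hq]
          rw [List.filter_cons_of_pos (by simp [hdvd]),
              List.filter_cons_of_neg (by simp [hdvd, hsq])]
          simp [hqd, List.append_assoc]
        · have hqd : PySem.Int.floordiv m d ≠ d := by
            intro h; rw [h] at hq; exact hsq hq
          rw [List.filter_cons_of_pos (by simp [hdvd]),
              List.filter_cons_of_pos (by simp [hdvd, hsq])]
          simp [hqd, List.append_assoc]
      · have hmod : ¬ PySem.Int.mod m d = 0 := fun h =>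
          hdvd ((PySem.Int.mod_eq_zero_iff_dvd _ _).mp h)
        rw [if_neg hmod, ih (d + 1) _ _ (by omega) hcov']
        rw [List.filter_cons_of_neg (by simp [hdvd]),
            List.filter_cons_of_neg (by simp [hdvd])]
    · rw [if_neg hdm]
      have hsd : pvISqrt m < d := by
        by_contra h
        push_neg at h
        exact hdm ((pvISqrt_spec m d hm (by omega)).mpr h)
      rw [PySem.List.pyRange_one_eq_nil (by omega)]
      simp

-- B's per-number row, factored out of the fold body for the proofs
def pvRow (m : Int) : List Int :=
  let p := pvTrial m [1] [] 2 (m.toNat + 1)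
  if m > 1 then (p.1 ++ p.2.reverse) ++ [m] else p.1

theorem alt_eq_map (limit : Int) :
    divisors_sieve_alt limit = (PySem.List.pyRange 0 limit 1).map pvRow := by
  unfold divisors_sieve_alt
  have h : ∀ (l : List Int) (init : List (List Int)),
      l.foldl (fun result m =>
        let p := pvTrial m [1] [] 2 (m.toNat + 1)
        if m > 1 then result ++ [(p.1 ++ p.2.reverse) ++ [m]]
        else result ++ [p.1]) init = init ++ l.map pvRow := by
    intro l
    induction l with
    | nil => intro init; simp
    | cons m l ih =>
      intro init
      simp only [List.foldl_cons, List.map_cons, ih]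
      by_cases hm : m > 1 <;> simp [pvRow, hm]
  rw [h]
  rfl

theorem eq_of_pairwise_lt_of_mem_iff (l₁ l₂ : List Int)
    (h1 : l₁.Pairwise (· < ·)) (h2 : l₂.Pairwise (· < ·))
    (hm : ∀ x, x ∈ l₁ ↔ x ∈ l₂) : l₁ = l₂ := by
  have n1 : l₁.Nodup := h1.imp (fun h => ne_of_lt h)
  have n2 : l₂.Nodup := h2.imp (fun h => ne_of_lt h)
  have hp : l₁.Perm l₂ := (List.perm_ext_iff_of_nodup n1 n2).mpr hm
  exact List.Perm.eq_of_pairwise' (h1.imp le_of_lt) (h2.imp le_of_lt) hp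

-- B's row equals the ascending divisor list 1 :: [d in 2..m | d ∣ m]
theorem pvRow_eq (k : Int) (hk : 0 ≤ k) :
    pvRow k = 1 :: (PySem.List.pyRange 2 (k + 1) 1).filter (fun d => decide (d ∣ k)) := by
  have hcov : ∀ e : Int, 2 ≤ e → e * e ≤ k → e < 2 + (k.toNat + 1) := by
    intro e he hek
    have h1 : e * 1 ≤ e * e := by nlinarith
    omega
  have htrial := pvTrial_spec k hk (k.toNat + 1) 2 [1] [] le_rfl hcov
  by_cases hk1 : k ≤ 1
  · -- k = 0 or k = 1: the loop never runs and the row is [1]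
    have hs : pvISqrt k + 1 ≤ 2 := by
      rcases (by omega : k = 0 ∨ k = 1) with rfl | rfl <;> decide
    rw [PySem.List.pyRange_one_eq_nil hs] at htrial
    have hng : ¬ k > 1 := by omega
    simp only [pvRow, htrial, if_neg hng]
    rw [PySem.List.pyRange_one_eq_nil (by omega : k + 1 ≤ 2)]
    simp
  · -- k ≥ 2
    push_neg at hk1
    set s := pvISqrt k with hsdef
    have hs1 : 1 ≤ s := by
      have := (pvISqrt_spec k 1 hk (by omega)).mp (by omega)
      omega
    have hsk : s * s ≤ k := (pvISqrt_spec k s hk (by omega)).mpr le_rfl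
    have hslt : s < k := by nlinarith
    have hg : k > 1 := by omega
    simp only [pvRow, htrial, if_pos hg]
    simp only [List.nil_append, List.cons_append]
    -- reduce to an equality of strictly increasing divisor lists
    have key :
        (PySem.List.pyRange 2 (s + 1) 1).filter (fun e => decide (e ∣ k)) ++
          ((((PySem.List.pyRange 2 (s + 1) 1).filter
              (fun e => decide (e ∣ k) && decide (e * e ≠ k))).map
            (fun e => PySem.Int.floordiv k e)).reverse ++ [k]) =
        (PySem.List.pyRange 2 (k + 1) 1).filter (fun d => decide (d ∣ k)) := by
      apply eq_of_pairwise_lt_of_mem_iff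
      · -- left side is strictly increasing
        rw [List.pairwise_append]
        refine ⟨(PySem.List.pairwise_lt_pyRange_one 2 (s + 1)).filter _, ?_, ?_⟩
        · rw [List.pairwise_append]
          refine ⟨?_, by simp, ?_⟩
          · -- the reversed cofactor list is strictly increasing
            rw [List.pairwise_reverse, List.pairwise_map]
            apply List.Pairwise.imp_of_mem ?_
              ((PySem.List.pairwise_lt_pyRange_one 2 (s + 1)).filter _)
            intro a b ha hb hab
            simp only [List.mem_filter, PySem.List.mem_pyRange_one, Bool.and_eq_true,
              decide_eq_true_eq] at ha hb
            obtain ⟨⟨ha2, has⟩, hadvd, hane⟩ := ha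
            obtain ⟨⟨hb2, hbs⟩, hbdvd, hbne⟩ := hb
            have hqa := pv_mul_floordiv k a (by omega) hadvd
            have hqb := pv_mul_floordiv k b (by omega) hbdvd
            have hqa0 : 0 < PySem.Int.floordiv k a := by nlinarith
            nlinarith
          · -- every cofactor is below k
            intro x hx y hy
            simp only [List.mem_reverse, List.mem_map, List.mem_filter,
              PySem.List.mem_pyRange_one, Bool.and_eq_true, decide_eq_true_eq] at hx
            obtain ⟨e, ⟨⟨he2, hes⟩, hedvd, hene⟩, rfl⟩ := hx
            simp only [List.mem_singleton] at hy
            rw [hy]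
            have hq := pv_mul_floordiv k e (by omega) hedvd
            have hq0 : 0 < PySem.Int.floordiv k e := by nlinarith
            nlinarith
        · -- small divisors sit below every cofactor and below k
          intro x hx y hy
          simp only [List.mem_filter, PySem.List.mem_pyRange_one, decide_eq_true_eq] at hx
          obtain ⟨⟨hx2, hxs⟩, hxdvd⟩ := hx
          simp only [List.mem_append, List.mem_reverse, List.mem_map, List.mem_filter,
            PySem.List.mem_pyRange_one, Bool.and_eq_true, decide_eq_true_eq,
            List.mem_singleton] at hy
          rcases hy with ⟨e, ⟨⟨he2, hes⟩, hedvd, hene⟩, rfl⟩ | hyk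
          · -- cofactor q satisfies q * q > k ≥ s * s hence q > s ≥ x
            have hq := pv_mul_floordiv k e (by omega) hedvd
            have hee : e * e ≤ k := (pvISqrt_spec k e hk (by omega)).mpr (by omega)
            have heelt : e * e < k := lt_of_le_of_ne hee hene
            have hq0 : 0 < PySem.Int.floordiv k e := by nlinarith
            have heq : e < PySem.Int.floordiv k e := by nlinarith
            have hqq : k < PySem.Int.floordiv k e * PySem.Int.floordiv k e := by nlinarith
            nlinarith
          · rw [hyk]; omega
      · exact (PySem.List.pairwise_lt_pyRange_one 2 (k + 1)).filter _
      · -- same members on both sides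
        intro x
        simp only [List.mem_append, List.mem_reverse, List.mem_map, List.mem_filter,
          PySem.List.mem_pyRange_one, Bool.and_eq_true, decide_eq_true_eq,
          List.mem_singleton]
        constructor
        · rintro ((⟨⟨hx2, hxs⟩, hxdvd⟩) | ⟨e, ⟨⟨he2, hes⟩, hedvd, hene⟩, rfl⟩ | hxk)
          · exact ⟨⟨hx2, by omega⟩, hxdvd⟩
          · have hq := pv_mul_floordiv k e (by omega) hedvd
            have hee : e * e ≤ k := (pvISqrt_spec k e hk (by omega)).mpr (by omega)
            have heelt : e * e < k := lt_of_le_of_ne hee hene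
            have hq0 : 0 < PySem.Int.floordiv k e := by nlinarith
            have heq : e < PySem.Int.floordiv k e := by nlinarith
            refine ⟨⟨by nlinarith, by nlinarith⟩, ⟨e, by linarith [hq, mul_comm e (PySem.Int.floordiv k e)]⟩⟩
          · rw [hxk]; exact ⟨⟨by omega, by omega⟩, dvd_refl k⟩
        · rintro ⟨⟨hx2, hxk⟩, hxdvd⟩
          by_cases hxs : x ≤ s
          · exact Or.inl ⟨⟨hx2, by omega⟩, hxdvd⟩
          · push_neg at hxs
            by_cases hxk' : x = k
            · exact Or.inr (Or.inr hxk')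
            · -- x is a large divisor: pair it with its small cofactor e = k / x
              obtain ⟨e, he⟩ := hxdvd
              have he0 : 0 < e := by nlinarith
              have hxx : k < x * x := by
                by_contra h
                push_neg at h
                have := (pvISqrt_spec k x hk (by omega)).mp h
                omega
              have hex : e < x := by nlinarith
              have hee : e * e < k := by nlinarith
              have he2 : 2 ≤ e := by
                rcases (by omega : e = 1 ∨ 2 ≤ e) with rfl | h
                · omega
                · exact h
              have hes : e ≤ s := (pvISqrt_spec k e hk (by omega)).mp (by omega)
              refine Or.inr (Or.inl ⟨e, ⟨⟨he2, by omega⟩, ⟨x, by linarith [he, mul_comm x e]⟩, by nlinarith⟩, ?_⟩)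
              have := pv_mul_floordiv k e (by omega) ⟨x, by linarith [he, mul_comm x e]⟩
              nlinarith
    rw [← key]
    simp [List.append_assoc]

-- A-side filter over range(2, limit) for row k equals the full divisor filter over 2..k
theorem filters_eq (limit : Int) (k : Nat) (hk : (k : Int) < limit) :
    (PySem.List.pyRange 2 ((k : Int) + 1) 1).filter (fun d => decide (d ∣ (k : Int)))
      = (PySem.List.pyRange 2 limit 1).filter
        (fun i => decide (i ∣ (k : Int)) && decide (i ≤ (k : Int))) := by
  by_cases hk0 : k = 0
  · subst hk0
    rw [PySem.List.pyRange_one_eq_nil (by omega : ((0:Nat) : Int) + 1 ≤ 2)]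
    simp only [List.filter_nil]
    symm
    rw [List.filter_eq_nil_iff]
    intro i hi
    have := PySem.List.mem_pyRange_one.mp hi
    simp only [Bool.and_eq_true, decide_eq_true_eq, not_and]
    intro _
    omega
  · have hk1 : 1 ≤ k := by omega
    rw [PySem.List.pyRange_one_append 2 ((k : Int) + 1) limit (by omega) (by omega),
        List.filter_append]
    have h2 : (PySem.List.pyRange ((k : Int) + 1) limit 1).filter
        (fun i => decide (i ∣ (k : Int)) && decide (i ≤ (k : Int))) = [] := by
      rw [List.filter_eq_nil_iff]
      intro i hi
      have := PySem.List.mem_pyRange_one.mp hi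
      simp only [Bool.and_eq_true, decide_eq_true_eq, not_and]
      intro _
      omega
    rw [h2, List.append_nil]
    apply List.filter_congr
    intro d hd
    have hmem := PySem.List.mem_pyRange_one.mp hd
    have hdle : d ≤ (k : Int) := by omega
    simp [hdle]

theorem alt_getElem (limit : Int) (k : Nat) :
    (divisors_sieve_alt limit)[k]? =
      if k < limit.toNat then
        some (1 :: (PySem.List.pyRange 2 limit 1).filter
          (fun i => decide (i ∣ (k : Int)) && decide (i ≤ (k : Int))))
      else none := by
  rw [alt_eq_map, List.getElem?_map]
  by_cases hk : k < limit.toNat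
  · have hlen : k < (PySem.List.pyRange 0 limit 1).length := by
      rw [PySem.List.length_pyRange_one]; omega
    rw [List.getElem?_eq_getElem hlen, if_pos hk]
    have hval : (PySem.List.pyRange 0 limit 1)[k] = (k : Int) := by
      rw [PySem.List.getElem_pyRange_one]; omega
    simp only [Option.map_some, hval]
    rw [pvRow_eq (k : Int) (by omega), filters_eq limit k (by omega)]
  · have hlen : (PySem.List.pyRange 0 limit 1).length ≤ k := by
      rw [PySem.List.length_pyRange_one]; omega
    rw [List.getElem?_eq_none hlen, if_neg hk]
    rfl

-- ===== VERDICT =====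
theorem divisors_sieve_spec : Claim_equal_divisors_sieve := by
  intro limit _
  unfold Spec_divisors_sieve
  by_cases hl : 0 < limit
  · apply List.ext_getElem?
    intro k
    have hA : (divisors_sieve limit)[k]? =
        if k < limit.toNat then
          some (1 :: (PySem.List.pyRange 2 limit 1).filter
            (fun i => decide (i ∣ (k : Int)) && decide (i ≤ (k : Int))))
        else none := by
      show ((PySem.List.pyRange 2 limit 1).foldl
          (fun divs i => pvStamp i limit divs i (limit - i).toNat)
          ((PySem.List.pyRange 0 limit 1).map (fun _ => ([1] : List Int))))[k]? = _
      exact fold_getElem limit hl limit le_rfl k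
    rw [hA, alt_getElem limit k]
  · show ((PySem.List.pyRange 2 limit 1).foldl
        (fun divs i => pvStamp i limit divs i (limit - i).toNat)
        ((PySem.List.pyRange 0 limit 1).map (fun _ => ([1] : List Int))))
      = divisors_sieve_alt limit
    unfold divisors_sieve_alt
    rw [PySem.List.pyRange_one_eq_nil (by omega : limit ≤ 0),
        PySem.List.pyRange_one_eq_nil (by omega : limit ≤ 2)]
    rfl
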